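-- pv_equiv track=rewrite | github.com/baeksangha/python_sw | 3143_가장빠른문자열타이핑/source.py | solution
-- ===== SOURCE A (Python) =====
-- def solution(a, b):
--     idx = 0
--     answer = 0
--     while idx < len(a):
--         if a[idx:idx+len(b)] == b:
--             idx += len(b)
--         else:
--             idx += 1
--         answer += 1
--
--     return answer
-- ===== SOURCE B (Python) =====
-- def solution(a, b):
--     # closed form: each greedy match of b consumes len(b) chars in one step,
--     # every other char is one step; str.count counts the same greedy
--     # non-overlapping left-to-right matches.
--     return len(a) - a.count(b) * (len(b) - 1)
-- ===== Notes on version B (the rewrite author's own statement) =====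
-- stated objective: faster
-- what changed: replaced the explicit index-by-index greedy scan with the closed form len(a) - a.count(b)*(len(b)-1), using the built-in non-overlapping substring count
-- outside the precondition, e.g. on solution('', ''): A returns 0, B returns 1
import Mathlib
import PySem

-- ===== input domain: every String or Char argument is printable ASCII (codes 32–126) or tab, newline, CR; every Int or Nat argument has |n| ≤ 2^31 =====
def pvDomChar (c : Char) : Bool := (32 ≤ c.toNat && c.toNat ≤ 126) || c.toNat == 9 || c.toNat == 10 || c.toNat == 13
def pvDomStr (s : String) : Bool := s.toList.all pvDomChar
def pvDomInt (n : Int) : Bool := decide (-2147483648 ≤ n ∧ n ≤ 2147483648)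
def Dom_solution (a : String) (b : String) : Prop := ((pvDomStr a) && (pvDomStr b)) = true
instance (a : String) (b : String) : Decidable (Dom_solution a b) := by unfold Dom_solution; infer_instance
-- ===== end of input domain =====

-- B replaces A's index-by-index greedy scan with the closed form
-- len(a) - a.count(b)*(len(b)-1) via the built-in non-overlapping substring count (faster).

-- ===== PORT A =====
-- the while loop of A; fuel = len(a) only guards termination (Python diverges when b = "",
-- which Pre_solution excludes; when b ≠ "" the index strictly increases so fuel never runs out)
def solutionLoop (aL bL : List Char) (fuel : Nat) (idx answer : Int) : Int :=
  match fuel with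
  | 0 => answer
  | fuel + 1 =>
    if idx < (aL.length : Int) then
      if PySem.List.slice aL (some idx) (some (idx + bL.length)) == bL then
        solutionLoop aL bL fuel (idx + bL.length) (answer + 1)
      else
        solutionLoop aL bL fuel (idx + 1) (answer + 1)
    else answer

def solution (a : String) (b : String) : Int :=
  solutionLoop a.toList b.toList a.toList.length 0 0

-- ===== PORT B =====
def solution_alt (a : String) (b : String) : Int :=
  (PySem.Str.len a : Int) - (PySem.Str.count a b : Int) * ((PySem.Str.len b : Int) - 1)

-- ===== PRECONDITION & SPEC =====
-- Pre_ excludes b = "": for non-empty a the Python A's while loop never advances and diverges there,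
-- and at a = '' both sides of that degenerate corner are defensible (A returns 0, B's closed form 1).
def Pre_solution (a : String) (b : String) : Prop := b ≠ ""
instance (a : String) (b : String) : Decidable (Pre_solution a b) := by unfold Pre_solution; infer_instance
def pvWitness_solution : String × String := ("abcbcbc", "bc")

def Spec_solution (a : String) (b : String) (out : Int) : Prop := out = solution_alt a b
instance (a : String) (b : String) (out : Int) : Decidable (Spec_solution a b out) := by unfold Spec_solution; infer_instance

-- ===== CLAIM (what is proved, stated in full; the proofs are below) =====
def Claim_equal_solution : Prop := ∀ (a : String) (b : String), Dom_solution a b → Pre_solution a b → Spec_solution a b (solution a b)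

-- ===== LEMMAS AND PROOFS =====

theorem go_zero_fuel (sub l : List Char) (acc : Nat) : PySem.Chars.count.go sub 0 l acc = acc := rfl

theorem go_nil (sub : List Char) (fuel acc : Nat) : PySem.Chars.count.go sub fuel [] acc = acc := by
  cases fuel <;> rfl

theorem go_step (sub l : List Char) (hl : l ≠ []) (fuel acc : Nat) :
    PySem.Chars.count.go sub (fuel + 1) l acc =
      if sub.isPrefixOf l then PySem.Chars.count.go sub fuel (l.drop sub.length) (acc + 1)
      else PySem.Chars.count.go sub fuel l.tail acc := by
  obtain ⟨h, t, rfl⟩ := List.exists_cons_of_ne_nil hl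
  rfl

-- accumulator of count.go is additive
theorem go_acc (sub : List Char) (fuel : Nat) : ∀ (l : List Char) (acc : Nat),
    PySem.Chars.count.go sub fuel l acc = acc + PySem.Chars.count.go sub fuel l 0 := by
  induction fuel with
  | zero => intro l acc; simp [go_zero_fuel]
  | succ fuel ih =>
    intro l acc
    by_cases hl : l = []
    · simp [hl, go_nil]
    · rw [go_step sub l hl, go_step sub l hl]
      split_ifs with hp
      · rw [ih _ (acc + 1), ih _ (0 + 1)]; omega
      · exact ih l.tail acc

-- the greedy match can only fire when the whole pattern fits
theorem prefix_length_le {bL l : List Char} (h : bL.isPrefixOf l) : bL.length ≤ l.length :=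
  List.IsPrefix.length_le (List.isPrefixOf_iff_prefix.mp h)

-- A's slice comparison at index k is prefix matching on the dropped suffix
theorem slice_eq_iff (aL bL : List Char) (k : Nat) :
    (PySem.List.slice aL (some (k : Int)) (some ((k : Int) + bL.length)) == bL) = bL.isPrefixOf (aL.drop k) := by
  have hc : ((k : Int) + (bL.length : Int)) = ((k + bL.length : Nat) : Int) := by push_cast; ring
  rw [hc, PySem.List.slice_natCast]
  have h2 : k + bL.length - k = bL.length := by omega
  rw [h2]
  by_cases hp : bL.isPrefixOf (aL.drop k)
  · have he := (List.prefix_iff_eq_take.mp (List.isPrefixOf_iff_prefix.mp hp)).symm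
    simp [hp, he]
  · simp only [hp, beq_eq_false_iff_ne, ne_eq]
    intro he
    exact hp (List.isPrefixOf_iff_prefix.mpr (List.prefix_iff_eq_take.mpr he.symm))

-- the main invariant: A's loop at index k equals the closed form over the remaining suffix
theorem loop_eq_go (aL bL : List Char) (hb : bL ≠ []) (fuel : Nat) :
    ∀ (k : Nat) (answer : Int), k ≤ aL.length → aL.length - k ≤ fuel →
      solutionLoop aL bL fuel (k : Int) answer =
        answer + ((aL.length - k : Nat) : Int)
          - (PySem.Chars.count.go bL fuel (aL.drop k) 0 : Int) * ((bL.length : Int) - 1) := by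
  induction fuel with
  | zero =>
    intro k answer hk hf
    have hk' : k = aL.length := by omega
    subst hk'
    simp [solutionLoop, go_zero_fuel]
  | succ fuel ih =>
    intro k answer hk hf
    by_cases hlt : k < aL.length
    · have hlt' : ((k : Int) < (aL.length : Int)) := by exact_mod_cast hlt
      have hdrop : aL.drop k ≠ [] := by
        intro h
        have := List.drop_eq_nil_iff.mp h
        omega
      rw [solutionLoop]
      simp only [hlt', if_true]
      rw [slice_eq_iff aL bL k, go_step bL (aL.drop k) hdrop]
      split_ifs with hp
      · -- match: skip bL.length characters
        have hble : bL.length ≤ (aL.drop k).length := prefix_length_le hp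
        have hble' : k + bL.length ≤ aL.length := by
          rw [List.length_drop] at hble; omega
        have hm : 0 < bL.length := List.length_pos_iff.mpr hb
        have hstep : ((k : Int) + (bL.length : Int)) = ((k + bL.length : Nat) : Int) := by push_cast; ring
        rw [hstep, ih (k + bL.length) (answer + 1) hble' (by omega), List.drop_drop]
        simp only [Nat.zero_add]
        rw [go_acc bL fuel (List.drop (k + bL.length) aL) 1]
        have e1 : ((aL.length - (k + bL.length) : Nat) : Int) = (aL.length : Int) - k - bL.length := by omega
        have e2 : ((aL.length - k : Nat) : Int) = (aL.length : Int) - k := by omega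
        rw [e1, e2]
        push_cast
        ring
      · -- no match: advance one character
        have hstep : ((k : Int) + 1) = ((k + 1 : Nat) : Int) := by push_cast; ring
        rw [hstep, ih (k + 1) (answer + 1) (by omega) (by omega), List.tail_drop]
        have e1 : ((aL.length - (k + 1) : Nat) : Int) = (aL.length : Int) - k - 1 := by omega
        have e2 : ((aL.length - k : Nat) : Int) = (aL.length : Int) - k := by omega
        rw [e1, e2]
        ring
    · have hk' : k = aL.length := by omega
      subst hk'
      rw [solutionLoop]
      simp [go_nil]

-- ===== VERDICT (by name: the statement is the Claim_ definition above) =====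
theorem solution_spec : Claim_equal_solution := by
  intro a b _ hpre
  unfold Spec_solution solution solution_alt
  have hb : b.toList ≠ [] := by simpa [String.toList_eq_nil_iff] using hpre
  have h := loop_eq_go a.toList b.toList hb a.toList.length 0 0 (by omega) (by omega)
  simp only [Nat.cast_zero, List.drop_zero, Nat.sub_zero] at h
  rw [h]
  have hcount : PySem.Str.count a b = PySem.Chars.count.go b.toList a.toList.length a.toList 0 := by
    simp only [PySem.Str.count, PySem.Chars.count]
    rw [if_neg (by simpa [List.isEmpty_iff] using hb)]
  rw [PySem.Str.len_eq, PySem.Str.len_eq, hcount]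
  ring
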